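-- pv_equiv track=rewrite | github.com/sankakusango/arxiv-honyaku | src/arxiv_honyaku/core/chunker.py | _measure_unclosed_brace_balance
-- ===== SOURCE A (Python) =====
-- def _measure_unclosed_brace_balance(text: str) -> int:
--     """行コメントを除いた文字列内の未閉鎖波括弧バランスを返す.
--
--     Args:
--         text: 判定対象文字列.
--
--     Returns:
--         int: ``{`` を ``+1``, ``}`` を ``-1`` とした総和.
--     """
--     balance = 0
--     escaped = False
--     for character in text:
--         if escaped:
--             escaped = False
--             continue
--         if character == "\\":
--             escaped = True
--             continue
--         if character == "%":
--             break
--         if character == "{":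
--             balance += 1
--         elif character == "}":
--             balance -= 1
--     return balance
-- ===== SOURCE B (Python) =====
-- def _measure_unclosed_brace_balance(text: str) -> int:
--     head = _strip_escape_pairs(text).split("%", 1)[0]
--     return head.count("{") - head.count("}")
--
--
-- def _strip_escape_pairs(text: str) -> str:
--     """Remove every backslash together with the character it escapes."""
--     kept = []
--     chars = iter(text)
--     for ch in chars:
--         if ch == "\\":
--             next(chars, None)  # drop the escaped character (or a trailing lone backslash)
--         else:
--             kept.append(ch)
--     return "".join(kept)
-- ===== Notes on version B (the rewrite author's own statement) =====
-- stated objective: simpler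
-- what changed: Replaces the fused per-character loop with escape/break state by a declarative pipeline: strip the backslash-escape pairs, cut the text at the first remaining comment character, and return the count of opening braces minus the count of closing braces.
import Mathlib
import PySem

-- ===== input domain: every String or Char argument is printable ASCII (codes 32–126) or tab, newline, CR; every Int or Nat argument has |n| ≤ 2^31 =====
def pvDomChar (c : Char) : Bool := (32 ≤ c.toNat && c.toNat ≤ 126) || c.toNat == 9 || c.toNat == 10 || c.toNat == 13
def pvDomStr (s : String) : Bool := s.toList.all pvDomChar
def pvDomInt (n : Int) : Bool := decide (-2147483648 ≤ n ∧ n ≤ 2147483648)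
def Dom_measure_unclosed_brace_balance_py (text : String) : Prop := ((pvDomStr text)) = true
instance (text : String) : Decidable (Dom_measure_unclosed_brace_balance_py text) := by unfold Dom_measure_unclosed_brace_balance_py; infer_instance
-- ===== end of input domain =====

-- B replaces A's fused stateful character loop by a three-stage pipeline
-- (strip escape pairs, cut at the first '%', count braces); same cost, simpler.

-- ===== PORT A =====
-- the for-loop of A, state = (balance, escaped); 'break' on '%' returns the balance
def pvGoA : List Char → Int → Bool → Int
  | [], balance, _ => balance
  | c :: cs, balance, escaped =>
    if escaped then pvGoA cs balance false
    else if c = '\\' then pvGoA cs balance true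
    else if c = '%' then balance
    else if c = '{' then pvGoA cs (balance + 1) false
    else if c = '}' then pvGoA cs (balance - 1) false
    else pvGoA cs balance false

def measure_unclosed_brace_balance_py (text : String) : Int :=
  pvGoA text.toList 0 false

-- ===== PORT B =====
-- _strip_escape_pairs: drop every backslash together with the character after it
def pvStripEsc : List Char → List Char
  | [] => []
  | ['\\'] => []
  | '\\' :: _ :: rest => pvStripEsc rest
  | c :: cs => c :: pvStripEsc cs

def measure_unclosed_brace_balance_py_alt (text : String) : Int :=
  -- split("%", 1)[0] is exactly the characters before the first '%'
  let head := (pvStripEsc text.toList).takeWhile (· != '%')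
  (head.count '{' : Int) - (head.count '}' : Int)

-- ===== PRECONDITION & SPEC =====
def Spec_measure_unclosed_brace_balance_py (text : String) (out : Int) : Prop := out = measure_unclosed_brace_balance_py_alt text
instance (text : String) (out : Int) : Decidable (Spec_measure_unclosed_brace_balance_py text out) := by unfold Spec_measure_unclosed_brace_balance_py; infer_instance

-- ===== CLAIM (what is proved, stated in full; the proofs are below) =====
def Claim_equal_measure_unclosed_brace_balance_py : Prop := ∀ (text : String), Dom_measure_unclosed_brace_balance_py text → Spec_measure_unclosed_brace_balance_py text (measure_unclosed_brace_balance_py text)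

-- ===== LEMMAS AND PROOFS =====

def pvCnt (l : List Char) : Int :=
  ((l.takeWhile (· != '%')).count '{' : Int) - ((l.takeWhile (· != '%')).count '}' : Int)

lemma pvGoA_eq_cnt : ∀ (cs : List Char) (b : Int), pvGoA cs b false = b + pvCnt (pvStripEsc cs) := by
  intro cs
  induction cs using pvStripEsc.induct with
  | case1 => intro b; simp [pvGoA, pvStripEsc, pvCnt]
  | case2 => intro b; simp [pvGoA, pvStripEsc, pvCnt]
  | case3 c rest ih => intro b; simpa [pvGoA, pvStripEsc] using ih b
  | case4 c cs hne1 hne2 ih =>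
    intro b
    have hc : c ≠ '\\' := by
      intro h
      rcases cs with _ | ⟨d, rest⟩
      · exact hne1 h rfl
      · exact hne2 d rest h rfl
    by_cases h1 : c = '%'
    · subst h1; simp [pvGoA, pvStripEsc, pvCnt]
    · by_cases h2 : c = '{'
      · subst h2
        simp only [pvGoA, pvStripEsc, reduceIte]
        rw [ih (b + 1)]
        simp [pvCnt, List.takeWhile]
        ring
      · by_cases h3 : c = '}'
        · subst h3
          simp only [pvGoA, pvStripEsc, reduceIte]
          rw [ih (b - 1)]
          simp [pvCnt, List.takeWhile]
          ring
        · simp only [pvGoA, pvStripEsc, if_neg hc, if_neg h1, if_neg h2, if_neg h3]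
          rw [ih b]
          have hcp : (c != '%') = true := by simp [h1]
          simp [pvCnt, List.takeWhile, hcp, h2, h3]

-- ===== VERDICT (by name: the statement is the Claim_ definition above) =====
theorem measure_unclosed_brace_balance_py_spec : Claim_equal_measure_unclosed_brace_balance_py := by
  intro text _
  unfold Spec_measure_unclosed_brace_balance_py measure_unclosed_brace_balance_py measure_unclosed_brace_balance_py_alt
  rw [pvGoA_eq_cnt]
  simp [pvCnt]
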